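-- pv_equiv track=rewrite | github.com/DJC-GO-SOLO/Latent-SFT | src/compress_dymatic_soft_embedding/data.py | insert_special_token_every_k
-- ===== SOURCE A (Python) =====
-- def insert_special_token_every_k(ids, special_id, special_label_id=-100, k=2):
--     '''
--     Insert some special tokens into input_ids to extract semantics according to a predefined compression ratio.
--     Also insert -100 into label as a placeholder for the special token.
--     '''
--     new_ids = []
--     label_ids = []
--     count = 0
--     for i in range(len(ids)):
--         new_ids.append(ids[i])
--         label_ids.append(ids[i])
--         if (i + 1) % k == 0:
--             new_ids.append(special_id)
--             label_ids.append(special_label_id)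
--             count += 1
--     # If the number is not divisible, an extra special token is inserted at the end.
--     if len(ids) % k != 0:
--         new_ids.append(special_id)
--         label_ids.append(special_label_id)
--         count += 1
--     # double check
--     assert len(new_ids) == len(label_ids)
--     return new_ids, count, label_ids
-- ===== SOURCE B (Python) =====
-- def insert_special_token_every_k(ids, special_id, special_label_id=-100, k=2):
--     new_ids = []
--     label_ids = []
--     for j in range(0, len(ids), k):
--         chunk = ids[j:j + k]
--         new_ids += chunk + [special_id]
--         label_ids += chunk + [special_label_id]
--     count = -(-len(ids) // k)  # number of chunks = ceil(len(ids) / k)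
--     assert len(new_ids) == len(label_ids)
--     return new_ids, count, label_ids
-- ===== Notes on version B (the rewrite author's own statement) =====
-- stated objective: simpler
-- what changed: Replaces the per-element loop with its (i+1)%k test and separate trailing-insertion branch by a single pass over contiguous chunks of size k (one slice and one special token per chunk), with count computed directly as ceil(len(ids)/k); Pre_ excludes k <= 0, outside the natural domain of a compression ratio (A raises ZeroDivisionError at k = 0, and for negative k A's modulo test happens to still return a value that B does not reproduce).
-- outside the precondition, e.g. on insert_special_token_every_k([0, 1], -1, -1, -1): A returns ([0, -1, 1, -1], 2, [0, -1, 1, -1]), B returns ([], -2, [])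
import Mathlib
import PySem

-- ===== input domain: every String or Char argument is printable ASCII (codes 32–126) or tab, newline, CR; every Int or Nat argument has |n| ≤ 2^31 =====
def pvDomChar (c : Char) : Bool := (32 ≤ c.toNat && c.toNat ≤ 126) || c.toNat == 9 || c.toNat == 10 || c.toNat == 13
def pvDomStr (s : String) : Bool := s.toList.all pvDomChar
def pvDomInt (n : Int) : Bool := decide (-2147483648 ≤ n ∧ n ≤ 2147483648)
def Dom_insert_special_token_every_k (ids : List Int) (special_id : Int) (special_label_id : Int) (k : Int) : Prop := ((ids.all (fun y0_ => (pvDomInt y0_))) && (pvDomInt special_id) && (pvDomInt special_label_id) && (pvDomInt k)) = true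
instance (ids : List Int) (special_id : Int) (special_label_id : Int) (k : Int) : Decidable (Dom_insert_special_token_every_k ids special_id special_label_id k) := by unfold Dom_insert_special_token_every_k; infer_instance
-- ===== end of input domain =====

-- B replaces the per-element (i+1)%k test and the trailing-insertion branch of A by a
-- single pass over contiguous chunks of size k with count = ceil(len/k) (simpler decomposition).


-- ===== PORT A =====
def insert_special_token_every_k (ids : List Int) (special_id : Int) (special_label_id : Int) (k : Int) : List Int × Int × List Int :=
  -- for i in range(len(ids)): …   (state = (new_ids, label_ids, count); ids[i] is always
  -- in range here, so pyGetD with a dummy default is exact)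
  let s := (PySem.List.pyRange 0 (PySem.List.len ids)).foldl
    (fun (s : List Int × List Int × Int) (i : Int) =>
      let new_ids := s.1 ++ [PySem.List.pyGetD ids i 0]
      let label_ids := s.2.1 ++ [PySem.List.pyGetD ids i 0]
      if PySem.Int.mod (i + 1) k = 0 then
        (new_ids ++ [special_id], label_ids ++ [special_label_id], s.2.2 + 1)
      else
        (new_ids, label_ids, s.2.2)) ([], [], 0)
  -- if len(ids) % k != 0: …
  let s := if PySem.Int.mod (PySem.List.len ids) k ≠ 0 then
      (s.1 ++ [special_id], s.2.1 ++ [special_label_id], s.2.2 + 1)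
    else s
  -- the assert always holds; return new_ids, count, label_ids
  (s.1, s.2.2, s.2.1)

-- ===== PORT B =====
def insert_special_token_every_k_alt (ids : List Int) (special_id : Int) (special_label_id : Int) (k : Int) : List Int × Int × List Int :=
  -- for j in range(0, len(ids), k): chunk = ids[j:j+k]; append chunk + special
  let s := (PySem.List.pyRange 0 (PySem.List.len ids) k).foldl
    (fun (s : List Int × List Int) (j : Int) =>
      let chunk := PySem.List.slice ids (some j) (some (j + k))
      (s.1 ++ chunk ++ [special_id], s.2 ++ chunk ++ [special_label_id])) ([], [])
  let count : Int := -(PySem.Int.floordiv (-(PySem.List.len ids)) k)   -- -(-len(ids) // k)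
  (s.1, count, s.2)

-- ===== PRECONDITION & SPEC =====
-- Pre_: 1 ≤ k — the natural domain of a compression ratio. At k = 0 Python A raises
-- ZeroDivisionError at '(i+1) % k'; for negative k A's modulo test happens to still
-- return a value (same positions as |k|), an accident of '%' that B does not reproduce.
def Pre_insert_special_token_every_k (ids : List Int) (special_id : Int) (special_label_id : Int) (k : Int) : Prop := 1 ≤ k
instance (ids : List Int) (special_id : Int) (special_label_id : Int) (k : Int) : Decidable (Pre_insert_special_token_every_k ids special_id special_label_id k) := by unfold Pre_insert_special_token_every_k; infer_instance
def pvWitness_insert_special_token_every_k : List Int × Int × Int × Int := ([1, 2, 3], 9, -100, 2)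

def Spec_insert_special_token_every_k (ids : List Int) (special_id : Int) (special_label_id : Int) (k : Int) (out : List Int × Int × List Int) : Prop := out = insert_special_token_every_k_alt ids special_id special_label_id k
instance (ids : List Int) (special_id : Int) (special_label_id : Int) (k : Int) (out : List Int × Int × List Int) : Decidable (Spec_insert_special_token_every_k ids special_id special_label_id k out) := by unfold Spec_insert_special_token_every_k; infer_instance

-- ===== CLAIM (what is proved, stated in full; the proofs are below) =====
def Claim_equal_insert_special_token_every_k : Prop := ∀ (ids : List Int) (special_id : Int) (special_label_id : Int) (k : Int), Dom_insert_special_token_every_k ids special_id special_label_id k → Pre_insert_special_token_every_k ids special_id special_label_id k → Spec_insert_special_token_every_k ids special_id special_label_id k (insert_special_token_every_k ids special_id special_label_id k)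

-- ===== LEMMAS AND PROOFS =====

-- Shared shape of B's result: ids in blocks of size m+1, one special appended per block.
def chunkSpec (sid lid : Int) (m : Nat) : List Int → List Int × List Int × Int
  | [] => ([], [], 0)
  | x :: xs =>
    let c := x :: xs.take m
    let r := chunkSpec sid lid m (xs.drop m)
    (c ++ sid :: r.1, c ++ lid :: r.2.1, r.2.2 + 1)
termination_by l => l.length
decreasing_by simp

-- A's loop alone: full blocks get a special, a trailing partial block does not.
def loopSpec (sid lid : Int) (m : Nat) (l : List Int) : List Int × List Int × Int :=
  if h : l.length < m + 1 then (l, l, 0)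
  else
    let c := l.take (m + 1)
    let r := loopSpec sid lid m (l.drop (m + 1))
    (c ++ sid :: r.1, c ++ lid :: r.2.1, r.2.2 + 1)
termination_by l.length
decreasing_by simp; omega

-- A's loop body, as a function of the (index, value) pair.
def stepA (sid lid k : Int) (s : List Int × List Int × Int) (p : Int × Int) : List Int × List Int × Int :=
  let new_ids := s.1 ++ [p.2]
  let label_ids := s.2.1 ++ [p.2]
  if PySem.Int.mod (p.1 + 1) k = 0 then
    (new_ids ++ [sid], label_ids ++ [lid], s.2.2 + 1)
  else
    (new_ids, label_ids, s.2.2)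

theorem chunkSpec_count_nonneg (sid lid : Int) (m : Nat) (l : List Int) :
    0 ≤ (chunkSpec sid lid m l).2.2 := by
  induction l using chunkSpec.induct sid lid m with
  | case1 => simp [chunkSpec]
  | case2 x xs ih => simp [chunkSpec]; omega

theorem chunkSpec_count_bounds (sid lid : Int) (m : Nat) (l : List Int) :
    ((chunkSpec sid lid m l).2.2 - 1) * ((m : Int) + 1) < (l.length : Int) ∧
      (l.length : Int) ≤ (chunkSpec sid lid m l).2.2 * ((m : Int) + 1) := by
  induction l using chunkSpec.induct sid lid m with
  | case1 =>
    refine ⟨?_, by simp [chunkSpec]⟩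
    simp [chunkSpec]
    nlinarith [(Nat.cast_nonneg m : (0 : Int) ≤ (m : Int))]
  | case2 x xs ih =>
    have hnn := chunkSpec_count_nonneg sid lid m (xs.drop m)
    simp only [chunkSpec, List.length_cons, List.length_drop] at ih ⊢
    set r := (chunkSpec sid lid m (xs.drop m)).2.2 with hr
    obtain ⟨h1, h2⟩ := ih
    have e1 : (r - 1) * ((m : Int) + 1) = r * ((m : Int) + 1) - ((m : Int) + 1) := by ring
    have e3 : (r + 1) * ((m : Int) + 1) = r * ((m : Int) + 1) + ((m : Int) + 1) := by ring
    have e2 : (r + 1 - 1) * ((m : Int) + 1) = r * ((m : Int) + 1) := by ring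
    rw [e1] at h1
    rw [e2, e3]
    rcases eq_or_lt_of_le hnn with hz | hp
    · rw [← hz] at h1 h2 ⊢
      simp at h1 h2 ⊢
      omega
    · have h1le : (1 : Int) ≤ r := hp
      have hPle : ((m : Int) + 1) * 1 ≤ ((m : Int) + 1) * r := by
        apply mul_le_mul_of_nonneg_left h1le (by positivity)
      rw [mul_comm ((m : Int) + 1) r] at hPle
      generalize hq : r * ((m : Int) + 1) = q at *
      omega

theorem pyRange_pos_nil (a b s : Int) (hs : 0 < s) (h : b ≤ a) :
    PySem.List.pyRange a b s = [] := by
  rw [PySem.List.pyRange_of_pos a b hs]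
  simp [show ¬ a < b by omega]

theorem pyRange_pos_cons (a b s : Int) (hs : 0 < s) (h : a < b) :
    PySem.List.pyRange a b s = a :: PySem.List.pyRange (a + s) b s := by
  rw [PySem.List.pyRange_of_pos a b hs, PySem.List.pyRange_of_pos (a+s) b hs]
  have key : ∀ c : Int, 0 < c → (c + s - 1) / s = (c - 1) / s + 1 := by
    intro c hc
    have : c + s - 1 = (c - 1) + 1 * s := by ring
    rw [this, Int.add_mul_ediv_right _ _ (by omega : s ≠ 0)]
  have hnn : 0 ≤ (b - a - 1) / s := Int.ediv_nonneg (by omega) (by omega)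
  have hcount : ((b - a + s - 1) / s).toNat = ((b - a - 1) / s).toNat + 1 := by
    rw [key (b - a) (by omega)]; omega
  rw [if_pos h, hcount, List.range_succ_eq_map]
  simp only [List.map_cons, List.map_map]
  rw [List.cons_eq_cons]
  constructor
  · simp
  · rcases lt_or_ge (a + s) b with h2 | h2
    · rw [if_pos h2]
      have e2 : (b - (a+s) + s - 1) / s = (b - a - 1) / s := by
        have : b - (a+s) + s - 1 = b - a - 1 := by ring
        rw [this]
      rw [e2]
      apply List.map_congr_left
      intro x hx
      simp; ring
    · rw [if_neg (by omega)]
      have : (b - a - 1) / s = 0 := Int.ediv_eq_zero_of_lt (by omega) (by omega)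
      rw [this]
      simp

theorem B_loop (sid lid : Int) (m : Nat) (ids : List Int) :
    ∀ (l : List Int) (j : Nat), ids.drop j = l → ∀ (acc : List Int × List Int),
    (PySem.List.pyRange (j : Int) (PySem.List.len ids) ((m : Int) + 1)).foldl
      (fun (s : List Int × List Int) (jj : Int) =>
        (s.1 ++ PySem.List.slice ids (some jj) (some (jj + ((m : Int) + 1))) ++ [sid],
         s.2 ++ PySem.List.slice ids (some jj) (some (jj + ((m : Int) + 1))) ++ [lid])) acc
    = (acc.1 ++ (chunkSpec sid lid m l).1, acc.2 ++ (chunkSpec sid lid m l).2.1) := by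
  intro l
  induction l using chunkSpec.induct sid lid m with
  | case1 =>
    intro j hj acc
    rw [List.drop_eq_nil_iff] at hj
    rw [pyRange_pos_nil _ _ _ (by positivity) (by simp [PySem.List.len]; omega)]
    simp [chunkSpec]
  | case2 x xs ih =>
    intro j hj acc
    have hlt : j < ids.length := by
      have := congrArg List.length hj
      simp at this
      omega
    rw [pyRange_pos_cons _ _ _ (by positivity) (by simp only [PySem.List.len]; exact_mod_cast hlt)]
    rw [List.foldl_cons]
    have hchunk : PySem.List.slice ids (some (j : Int)) (some ((j : Int) + ((m : Int) + 1)))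
        = x :: xs.take m := by
      rw [show ((j:Int) + ((m:Int)+1)) = ((j:Int) + ((m+1 : Nat):Int)) by push_cast; ring]
      rw [PySem.List.slice_natCast_add ids j (m+1)]
      rw [hj, List.take_succ_cons]
    rw [hchunk]
    have hcast : ((j : Int) + ((m : Int) + 1)) = ((j + (m + 1) : Nat) : Int) := by push_cast; ring
    rw [hcast]
    have hdrop : ids.drop (j + (m + 1)) = xs.drop m := by
      rw [← List.drop_drop, hj, List.drop_succ_cons]
    rw [ih (j + (m + 1)) hdrop
      ((acc.1 ++ (x :: xs.take m) ++ [sid], acc.2 ++ (x :: xs.take m) ++ [lid]))]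
    simp [chunkSpec, List.append_assoc]

-- positions strictly inside a block never fire A's (i+1) % k == 0 test
theorem nofire (M j t : Nat) (hj : M ∣ j) (ht : t + 1 < M) :
    ¬ (((M : Nat) : Int) ∣ ((j : Int) + (t : Int) + 1)) := by
  intro hd
  rw [show ((j:Int) + (t:Int) + 1) = ((j + t + 1 : Nat) : Int) by push_cast; ring,
    Int.natCast_dvd_natCast] at hd
  have h2 : M ∣ t + 1 := (Nat.dvd_add_right hj).mp (by rwa [show j + t + 1 = j + (t+1) by omega] at hd)
  have := Nat.le_of_dvd (by omega) h2
  omega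

theorem A_inner (sid lid k : Int) (c : List Int) :
    ∀ (j : Int) (acc : List Int × List Int × Int),
    (∀ t : Nat, t < c.length → ¬ (((k.natAbs : Nat) : Int) ∣ (j + t + 1))) →
    (PySem.List.enumerate c j).foldl (stepA sid lid k) acc
      = (acc.1 ++ c, acc.2.1 ++ c, acc.2.2) := by
  induction c with
  | nil => intro j acc h; simp [PySem.List.enumerate]
  | cons y ys ih =>
    intro j acc h
    have hcons : PySem.List.enumerate (y :: ys) j = (j, y) :: PySem.List.enumerate ys (j + 1) := by
      rw [show y :: ys = [y] ++ ys from rfl, PySem.List.enumerate_append]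
      simp [PySem.List.enumerate]
    rw [hcons, List.foldl_cons]
    have hnf : ¬ PySem.Int.mod (j + 1) k = 0 := by
      rw [PySem.Int.mod_eq_zero_iff_dvd, ← Int.natAbs_dvd]
      have := h 0 (by simp)
      simpa using this
    have hstep : stepA sid lid k acc (j, y) = (acc.1 ++ [y], acc.2.1 ++ [y], acc.2.2) := by
      simp [stepA, hnf]
    rw [hstep, ih (j + 1) _ (fun t ht => by
      have := h (t + 1) (by simp; omega)
      intro hd; apply this
      convert hd using 2
      push_cast; ring)]
    simp

theorem A_chunks (sid lid k : Int) (hk : k ≠ 0) (l : List Int) :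
    ∀ (j : Nat), (k.natAbs ∣ j) → ∀ (acc : List Int × List Int × Int),
    (PySem.List.enumerate l (j : Int)).foldl (stepA sid lid k) acc
      = (acc.1 ++ (loopSpec sid lid (k.natAbs - 1) l).1,
         acc.2.1 ++ (loopSpec sid lid (k.natAbs - 1) l).2.1,
         acc.2.2 + (loopSpec sid lid (k.natAbs - 1) l).2.2) := by
  have hM : 0 < k.natAbs := Int.natAbs_pos.2 hk
  have hm1 : k.natAbs - 1 + 1 = k.natAbs := by omega
  induction l using loopSpec.induct sid lid (k.natAbs - 1) with
  | case1 l hlen =>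
    intro j hj acc
    rw [loopSpec, dif_pos hlen]
    rw [A_inner sid lid k l (j : Int) acc (fun t ht => nofire k.natAbs j t hj (by omega))]
    simp
  | case2 l hlen ih =>
    intro j hj acc
    have hlenM : k.natAbs ≤ l.length := by omega
    have hclen : (l.take (k.natAbs - 1 + 1)).length = k.natAbs := by
      rw [List.length_take]; omega
    have hcne : l.take (k.natAbs - 1 + 1) ≠ [] := by
      intro h0; rw [h0] at hclen; simp at hclen; omega
    rw [loopSpec, dif_neg hlen]
    conv_lhs => rw [← List.take_append_drop (k.natAbs - 1 + 1) l]
    rw [PySem.List.enumerate_append, List.foldl_append]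
    set c := l.take (k.natAbs - 1 + 1) with hcdef
    set rest := l.drop (k.natAbs - 1 + 1) with hrdef
    have hdl : c.dropLast.length = k.natAbs - 1 := by
      rw [List.length_dropLast, hclen]
    have hsplit : c.dropLast ++ [c.getLast hcne] = c := List.dropLast_concat_getLast hcne
    rw [show PySem.List.enumerate c (j : Int)
        = PySem.List.enumerate c.dropLast (j : Int)
          ++ PySem.List.enumerate [c.getLast hcne] ((j : Int) + (c.dropLast.length : Int)) from by
      rw [← PySem.List.enumerate_append, hsplit]]
    rw [List.foldl_append]
    rw [A_inner sid lid k c.dropLast (j : Int) acc (fun t ht => by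
      rw [hdl] at ht
      exact nofire k.natAbs j t hj (by omega))]
    rw [hdl]
    have hfire : PySem.Int.mod ((j : Int) + ((k.natAbs - 1 : Nat) : Int) + 1) k = 0 := by
      rw [PySem.Int.mod_eq_zero_iff_dvd, ← Int.natAbs_dvd]
      rw [show ((j : Int) + ((k.natAbs - 1 : Nat) : Int) + 1) = ((j + k.natAbs : Nat) : Int) by
        omega]
      exact Int.natCast_dvd_natCast.2 (Dvd.dvd.add hj dvd_rfl)
    rw [show PySem.List.enumerate [c.getLast hcne] ((j : Int) + ((k.natAbs - 1 : Nat) : Int))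
        = [(((j : Int) + ((k.natAbs - 1 : Nat) : Int)), c.getLast hcne)] from by
      simp [PySem.List.enumerate]]
    rw [List.foldl_cons, List.foldl_nil]
    rw [show stepA sid lid k (acc.1 ++ c.dropLast, acc.2.1 ++ c.dropLast, acc.2.2)
          (((j : Int) + ((k.natAbs - 1 : Nat) : Int)), c.getLast hcne)
        = (acc.1 ++ c.dropLast ++ [c.getLast hcne] ++ [sid],
           acc.2.1 ++ c.dropLast ++ [c.getLast hcne] ++ [lid], acc.2.2 + 1) from by
      simp [stepA, hfire]]
    have hstart : ((j : Int) + (c.length : Int)) = ((j + k.natAbs : Nat) : Int) := by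
      rw [hclen]; push_cast; ring
    rw [hstart]
    rw [ih (j + k.natAbs) (Dvd.dvd.add hj dvd_rfl) _]
    have hre : acc.1 ++ c.dropLast ++ [c.getLast hcne] = acc.1 ++ c := by
      rw [List.append_assoc, hsplit]
    have hre2 : acc.2.1 ++ c.dropLast ++ [c.getLast hcne] = acc.2.1 ++ c := by
      rw [List.append_assoc, hsplit]
    simp only [hre, hre2]
    simp [List.append_assoc]
    omega

theorem post_eq (sid lid : Int) (m : Nat) (l : List Int) :
    (if l.length % (m + 1) ≠ 0 then
      ((loopSpec sid lid m l).1 ++ [sid], (loopSpec sid lid m l).2.1 ++ [lid],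
        (loopSpec sid lid m l).2.2 + 1)
    else loopSpec sid lid m l) = chunkSpec sid lid m l := by
  induction l using loopSpec.induct sid lid m with
  | case1 l hlen =>
    rcases l with _ | ⟨x, xs⟩
    · simp [loopSpec, chunkSpec]
    · have hx : xs.length ≤ m := by
        simp only [List.length_cons] at hlen; omega
      rw [loopSpec, dif_pos hlen]
      rw [if_pos (by rw [Nat.mod_eq_of_lt hlen]; simp)]
      simp [chunkSpec, List.take_of_length_le hx, List.drop_eq_nil_of_le hx]
  | case2 l hlen ih =>
    have hlen' : m + 1 ≤ l.length := by omega
    rcases hl : l with _ | ⟨x, xs⟩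
    · rw [hl] at hlen'; simp at hlen'
    · rw [← hl]
      have hmod : l.length % (m + 1) = (l.drop (m + 1)).length % (m + 1) := by
        rw [show l.length = (l.drop (m + 1)).length + (m + 1) by
          rw [List.length_drop]; omega, Nat.add_mod_right]
      rw [loopSpec, dif_neg hlen]
      have hchunk : chunkSpec sid lid m l
          = (l.take (m + 1) ++ sid :: (chunkSpec sid lid m (l.drop (m + 1))).1,
             l.take (m + 1) ++ lid :: (chunkSpec sid lid m (l.drop (m + 1))).2.1,
             (chunkSpec sid lid m (l.drop (m + 1))).2.2 + 1) := by
        rw [hl]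
        simp [chunkSpec, List.take_succ_cons, List.drop_succ_cons]
      rw [hchunk]
      by_cases hz : (l.drop (m + 1)).length % (m + 1) = 0
      · rw [if_neg (by rw [hmod]; simpa using hz)]
        rw [if_neg (by simpa using hz)] at ih
        rw [ih]
      · rw [if_pos (by rw [hmod]; simpa using hz)]
        rw [if_pos (by simpa using hz)] at ih
        rw [← ih]
        simp [List.append_assoc]

-- ===== VERDICT (by name: the statement is the Claim_ definition above) =====
theorem insert_special_token_every_k_spec : Claim_equal_insert_special_token_every_k := by
  intro ids sid lid k _hdom hk1
  unfold Pre_insert_special_token_every_k at hk1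
  unfold Spec_insert_special_token_every_k
  have hk : k ≠ 0 := by omega
  have hM : 0 < k.natAbs := Int.natAbs_pos.2 hk
  have hm1 : k.natAbs - 1 + 1 = k.natAbs := by omega
  have hkc : k = ((k.natAbs - 1 : Nat) : Int) + 1 := by omega
  -- A's loop, rewritten over enumerate and evaluated by blocks
  have hA : insert_special_token_every_k ids sid lid k =
      (let F := (PySem.List.enumerate ids 0).foldl (stepA sid lid k) ([], [], 0)
       let s := if PySem.Int.mod (PySem.List.len ids) k ≠ 0 then
           (F.1 ++ [sid], F.2.1 ++ [lid], F.2.2 + 1) else F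
       (s.1, s.2.2, s.2.1)) := by
    unfold insert_special_token_every_k
    rw [PySem.List.enumerate_eq_map_pyRange ids 0, List.foldl_map]
    rfl
  have key := A_chunks sid lid k hk ids 0 (Dvd.intro 0 rfl) ([], [], 0)
  simp only [Nat.cast_zero, List.nil_append, zero_add] at key
  rw [hA]
  simp only []
  rw [key]
  -- B's side: the step k is ((k.natAbs - 1 : Nat) : Int) + 1
  have hBL := B_loop sid lid (k.natAbs - 1) ids ids 0 List.drop_zero ([], [])
  simp only [Nat.cast_zero, List.nil_append] at hBL
  have hcount : -(PySem.Int.floordiv (-(PySem.List.len ids)) (((k.natAbs - 1 : Nat) : Int) + 1))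
      = (chunkSpec sid lid (k.natAbs - 1) ids).2.2 := by
    rw [PySem.Int.neg_floordiv_neg_eq_iff_of_pos (by omega)]
    exact (chunkSpec_count_bounds sid lid (k.natAbs - 1) ids)
  have hB : insert_special_token_every_k_alt ids sid lid k =
      ((chunkSpec sid lid (k.natAbs - 1) ids).1,
       (chunkSpec sid lid (k.natAbs - 1) ids).2.2,
       (chunkSpec sid lid (k.natAbs - 1) ids).2.1) := by
    unfold insert_special_token_every_k_alt
    conv_lhs => rw [hkc]
    rw [hBL, hcount]
  rw [hB]
  -- combine via post_eq; the A-side condition len % k ≠ 0 is length % |k| ≠ 0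
  have hcond : (PySem.Int.mod (PySem.List.len ids) k = 0) ↔ (ids.length % (k.natAbs - 1 + 1) = 0) := by
    simp only [PySem.List.len]
    rw [PySem.Int.mod_eq_zero_iff_dvd, ← Int.natAbs_dvd, hm1, Int.natCast_dvd_natCast]
    exact Nat.dvd_iff_mod_eq_zero
  have hpost := post_eq sid lid (k.natAbs - 1) ids
  by_cases hz : ids.length % (k.natAbs - 1 + 1) = 0
  · rw [if_neg (by simpa using hz)] at hpost
    rw [if_neg (not_not_intro (hcond.mpr hz))]
    rw [hpost]
  · rw [if_pos (by simpa using hz)] at hpost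
    rw [if_pos (fun h0 => hz (hcond.mp h0))]
    rw [← hpost]
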